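-- pv_equiv track=rewrite | github.com/rydzynskim/advent_of_code_20224 | solutions/15_2.py | bfs_box_positions
-- ===== SOURCE A (Python) =====
-- def next_pos(row, col, dir):
--     if dir == '<':
--         return [row, col-1]
--     if dir == '^':
--         return [row-1, col]
--     if dir == '>':
--         return [row, col+1]
--     if dir == 'v':
--         return [row+1, col]
--     raise ValueError(f"Invalid dir: {dir}")
--
-- def bfs_box_positions(grid, row, col, dir):
--     positions = []
--     current = [[row, col]]
--     while len(current) > 0:
--         next = []
--         for c in current:
--             n = next_pos(c[0], c[1], dir)
--             nv = grid[n[0]][n[1]]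
--             if nv == '[' or nv == ']':
--                 next.append(n)
--             if dir == '<' or dir == '>':
--                 continue
--             cv = grid[c[0]][c[1]]
--             if (cv == ']' or cv == '.') and nv == '[':
--                 next.append([n[0], n[1]+1])
--             if (cv == '[' or cv == '.') and nv == ']':
--                 next.append([n[0], n[1]-1])
--         for n in next:
--             positions.append(n)
--         current = next
--     return positions
-- ===== SOURCE B (Python) =====
-- def _pushed(grid, r, c, dr):
--     # cells a vertically pushed cell (r, c) drags along: its forward neighbor
--     # if it is a box half, plus the other half of that box when (r, c) itself
--     # does not already cover it
--     nr = r + dr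
--     nv = grid[nr][c]
--     cv = grid[r][c]
--     out = [[nr, c]] if nv == '[' or nv == ']' else []
--     if (cv == ']' or cv == '.') and nv == '[':
--         out.append([nr, c + 1])
--     if (cv == '[' or cv == '.') and nv == ']':
--         out.append([nr, c - 1])
--     return out
--
--
-- def _cascade(grid, cells, dr):
--     # recursive level expansion: one comprehension per generation, the result
--     # is this generation followed by everything it drags along in turn
--     nxt = [p for cell in cells for p in _pushed(grid, cell[0], cell[1], dr)]
--     return nxt + _cascade(grid, nxt, dr) if nxt else []
--
--
-- def bfs_box_positions(grid, row, col, dir):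
--     if dir == '<' or dir == '>':
--         # horizontal pushes never branch: just scan along the row
--         step = -1 if dir == '<' else 1
--         out = []
--         c = col + step
--         while grid[row][c] == '[' or grid[row][c] == ']':
--             out.append([row, c])
--             c += step
--         return out
--     if dir == '^' or dir == 'v':
--         return _cascade(grid, [[row, col]], -1 if dir == '^' else 1)
--     raise ValueError(f"Invalid dir: {dir}")
-- ===== Notes on version B (the rewrite author's own statement) =====
-- stated objective: simpler
-- what changed: B splits by direction instead of running one generic BFS: horizontal pushes, which can never branch, become a plain linear scan along the row with no frontier lists at all, and vertical pushes become a recursive cascade (one comprehension per generation, result = generation ++ cascade of it) in place of A's imperative while-loop threading `current`/`next`/`positions` accumulators.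
-- outside the precondition, e.g. on bfs_box_positions([['[', ']'], ['.', '.']], 1, 0, '^'): A returns [[0, 0], [0, 1]], B returns [[0, 0], [0, 1]]; on bfs_box_positions([['[', ']'], ['.', '.']], 1, 1, '^'): A returns [[0, 1], [0, 0]], B returns [[0, 1], [0, 0]]
import Mathlib
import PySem

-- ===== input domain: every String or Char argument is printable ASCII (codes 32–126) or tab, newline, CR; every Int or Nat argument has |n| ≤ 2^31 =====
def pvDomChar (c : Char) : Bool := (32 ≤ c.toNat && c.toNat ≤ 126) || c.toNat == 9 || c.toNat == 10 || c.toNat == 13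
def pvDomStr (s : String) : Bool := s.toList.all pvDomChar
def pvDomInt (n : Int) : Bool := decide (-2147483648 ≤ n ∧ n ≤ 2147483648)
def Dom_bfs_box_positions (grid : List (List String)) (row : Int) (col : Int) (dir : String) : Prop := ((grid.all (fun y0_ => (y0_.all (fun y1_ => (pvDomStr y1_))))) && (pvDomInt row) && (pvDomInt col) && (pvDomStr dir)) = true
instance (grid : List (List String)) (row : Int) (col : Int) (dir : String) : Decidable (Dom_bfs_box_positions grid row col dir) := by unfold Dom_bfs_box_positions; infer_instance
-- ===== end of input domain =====

-- B splits by direction: horizontal pushes become a plain linear scan along the row (no BFS),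
-- vertical pushes a recursive per-generation cascade, replacing A's imperative level loop
-- (objective: simpler).

-- shared grid access: grid[i][j], with "" standing in for the cells Python cannot read
-- (Pre_ keeps every Python read in range, so the default is never the value actually used)
def pvCellAt (grid : List (List String)) (i j : Int) : String :=
  ((PySem.List.pyGet? grid i).bind (fun r => PySem.List.pyGet? r j)).getD ""

def pvFuel (grid : List (List String)) (row col : Int) : Nat :=
  (grid.length + (grid.map (fun r => r.length)).sum + row.natAbs + col.natAbs) * 2 + 2

-- ===== PORT A =====
-- next_pos; Python raises ValueError on any other dir (excluded by Pre_), (r, c) is a dummy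
def pvNextPos (r c : Int) (dir : String) : Int × Int :=
  if dir = "<" then (r, c - 1)
  else if dir = "^" then (r - 1, c)
  else if dir = ">" then (r, c + 1)
  else if dir = "v" then (r + 1, c)
  else (r, c)

-- the body of A's `for c in current` loop, threading the `next` accumulator
def pvStepA (grid : List (List String)) (dir : String) (next : List (Int × Int)) (c : Int × Int) :
    List (Int × Int) :=
  let n := pvNextPos c.1 c.2 dir
  let nv := pvCellAt grid n.1 n.2
  let next := if nv = "[" ∨ nv = "]" then next ++ [n] else next
  if dir = "<" ∨ dir = ">" then next
  else
    let cv := pvCellAt grid c.1 c.2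
    let next := if (cv = "]" ∨ cv = ".") ∧ nv = "[" then next ++ [(n.1, n.2 + 1)] else next
    if (cv = "[" ∨ cv = ".") ∧ nv = "]" then next ++ [(n.1, n.2 - 1)] else next

-- A's `while len(current) > 0` loop (fuel only makes it total)
def pvLoopA (grid : List (List String)) (dir : String) :
    Nat → List (Int × Int) → List (Int × Int) → List (Int × Int)
  | 0, _, positions => positions
  | fuel + 1, current, positions =>
    if current = [] then positions
    else
      let next := current.foldl (pvStepA grid dir) []
      pvLoopA grid dir fuel next (positions ++ next)

def bfs_box_positions (grid : List (List String)) (row : Int) (col : Int) (dir : String) :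
    List (List Int) :=
  (pvLoopA grid dir (pvFuel grid row col) [(row, col)] []).map (fun p => [p.1, p.2])

-- ===== PORT B =====
-- _pushed: cells a vertically pushed cell (r, c) drags along
def pvPushed (grid : List (List String)) (r c dr : Int) : List (Int × Int) :=
  let nr := r + dr
  let nv := pvCellAt grid nr c
  let cv := pvCellAt grid r c
  let out := if nv = "[" ∨ nv = "]" then [(nr, c)] else []
  let out := if (cv = "]" ∨ cv = ".") ∧ nv = "[" then out ++ [(nr, c + 1)] else out
  if (cv = "[" ∨ cv = ".") ∧ nv = "]" then out ++ [(nr, c - 1)] else out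

-- _cascade: recursion on generations (fuel only makes the recursion total)
def pvCascade (grid : List (List String)) (dr : Int) :
    Nat → List (Int × Int) → List (Int × Int)
  | 0, _ => []
  | fuel + 1, cells =>
    let nxt := cells.flatMap (fun cell => pvPushed grid cell.1 cell.2 dr)
    if nxt = [] then [] else nxt ++ pvCascade grid dr fuel nxt

-- the horizontal `while` scan (fuel only makes it total)
def pvWalk (grid : List (List String)) (row step : Int) :
    Nat → Int → List (Int × Int)
  | 0, _ => []
  | fuel + 1, c =>
    let c' := c + step
    let v := pvCellAt grid row c'
    if v = "[" ∨ v = "]" then (row, c') :: pvWalk grid row step fuel c' else []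

def bfs_box_positions_alt (grid : List (List String)) (row : Int) (col : Int) (dir : String) :
    List (List Int) :=
  if dir = "<" ∨ dir = ">" then
    (pvWalk grid row (if dir = "<" then -1 else 1) (pvFuel grid row col) col).map
      (fun p => [p.1, p.2])
  else if dir = "^" ∨ dir = "v" then
    (pvCascade grid (if dir = "^" then -1 else 1) (pvFuel grid row col) [(row, col)]).map
      (fun p => [p.1, p.2])
  else []  -- Python raises ValueError here; excluded by Pre_

-- ===== PRECONDITION & SPEC =====
def pvNonbox (s : String) : Prop := s ≠ "[" ∧ s ≠ "]"

-- Pre_ excludes exactly the inputs where Python A raises: an invalid dir (ValueError) and the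
-- index escapes (IndexError): a start row/column read out of range, or an unbroken box chain /
-- box-carrying boundary that lets the BFS walk past the wrap-around window.  On the vertical
-- dirs the no-raise set has no simple closed form, so past the quick "neighbour is not a box"
-- exit Pre_ conservatively asks for a rectangular grid whose border cells carry no box, which
-- drops some inputs A does return on (see claim.json cites).
def pvVertPre (grid : List (List String)) (row col nrow : Int) : Prop :=
  (-(grid.length : Int) ≤ nrow ∧ nrow ≤ (grid.length : Int) - 1) ∧
  (-((((PySem.List.pyGet? grid row).getD []).length : Int)) ≤ col ∧
    col ≤ (((PySem.List.pyGet? grid row).getD []).length : Int) - 1) ∧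
  (-((((PySem.List.pyGet? grid nrow).getD []).length : Int)) ≤ col ∧
    col ≤ (((PySem.List.pyGet? grid nrow).getD []).length : Int) - 1) ∧
  (pvNonbox (PySem.List.pyGetD ((PySem.List.pyGet? grid nrow).getD []) col "") ∨
    ((∀ r ∈ grid, r.length = grid.headI.length) ∧ 1 ≤ grid.headI.length ∧
     (∀ s ∈ grid.headI, pvNonbox s) ∧ (∀ s ∈ grid.getLastD [], pvNonbox s) ∧
     (∀ r ∈ grid, pvNonbox r.headI ∧ pvNonbox (r.getLastD ""))))

def Pre_bfs_box_positions (grid : List (List String)) (row : Int) (col : Int) (dir : String) : Prop :=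
  (dir = "<" ∨ dir = "^" ∨ dir = ">" ∨ dir = "v") ∧
  (-(grid.length : Int) ≤ row ∧ row ≤ (grid.length : Int) - 1) ∧
  (dir = "<" →
    1 - (((PySem.List.pyGet? grid row).getD []).length : Int) ≤ col ∧
    col ≤ (((PySem.List.pyGet? grid row).getD []).length : Int) ∧
    (1 ≤ col → ∃ s ∈ (PySem.List.pyGet? grid row).getD [], pvNonbox s) ∧
    (col ≤ 0 → ∃ s ∈ ((PySem.List.pyGet? grid row).getD []).take
        (col + (((PySem.List.pyGet? grid row).getD []).length : Int)).toNat, pvNonbox s)) ∧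
  (dir = ">" →
    -(((PySem.List.pyGet? grid row).getD []).length : Int) - 1 ≤ col ∧
    col ≤ (((PySem.List.pyGet? grid row).getD []).length : Int) - 1 ∧
    (0 ≤ col → ∃ s ∈ ((PySem.List.pyGet? grid row).getD []).drop (col + 1).toNat, pvNonbox s) ∧
    (col < 0 → ∃ s ∈ (PySem.List.pyGet? grid row).getD [], pvNonbox s)) ∧
  (dir = "^" → pvVertPre grid row col (row - 1)) ∧
  (dir = "v" → pvVertPre grid row col (row + 1))

instance (grid : List (List String)) (row : Int) (col : Int) (dir : String) :
    Decidable (Pre_bfs_box_positions grid row col dir) := by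
  have h : ∀ nrow : Int, Decidable (pvVertPre grid row col nrow) := fun nrow => by
    unfold pvVertPre pvNonbox; infer_instance
  haveI := h (row - 1); haveI := h (row + 1)
  unfold Pre_bfs_box_positions pvNonbox
  refine instDecidableAnd (dq := ?_)
  refine instDecidableAnd (dq := ?_)
  refine instDecidableAnd (dp := ?_) (dq := ?_)
  · infer_instance
  refine instDecidableAnd (dp := ?_) (dq := ?_)
  · infer_instance
  · infer_instance

def pvWitness_bfs_box_positions : List (List String) × Int × Int × String := ([["."]], 0, 0, "<")

def Spec_bfs_box_positions (grid : List (List String)) (row : Int) (col : Int) (dir : String) (out : List (List Int)) : Prop := out = bfs_box_positions_alt grid row col dir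
instance (grid : List (List String)) (row : Int) (col : Int) (dir : String) (out : List (List Int)) : Decidable (Spec_bfs_box_positions grid row col dir out) := by unfold Spec_bfs_box_positions; infer_instance

-- ===== CLAIM (what is proved, stated in full; the proofs are below) =====
def Claim_equal_bfs_box_positions : Prop := ∀ (grid : List (List String)) (row : Int) (col : Int) (dir : String), Dom_bfs_box_positions grid row col dir → Pre_bfs_box_positions grid row col dir → Spec_bfs_box_positions grid row col dir (bfs_box_positions grid row col dir)

-- ===== LEMMAS AND PROOFS =====

-- the per-cell emission A performs (proof-side reading of pvStepA from an empty accumulator)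
def pvEmitA (grid : List (List String)) (dir : String) (c : Int × Int) : List (Int × Int) :=
  let n := pvNextPos c.1 c.2 dir
  let nv := pvCellAt grid n.1 n.2
  let res := if nv = "[" ∨ nv = "]" then [n] else []
  if dir = "<" ∨ dir = ">" then res
  else
    let cv := pvCellAt grid c.1 c.2
    let res := if (cv = "]" ∨ cv = ".") ∧ nv = "[" then res ++ [(n.1, n.2 + 1)] else res
    if (cv = "[" ∨ cv = ".") ∧ nv = "]" then res ++ [(n.1, n.2 - 1)] else res

-- the level expansion A performs: each round emits cur.flatMap ch and recurses on it
def pvLevels (ch : Int × Int → List (Int × Int)) : Nat → List (Int × Int) → List (Int × Int)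
  | 0, _ => []
  | f + 1, cur =>
    if cur = [] then []
    else cur.flatMap ch ++ pvLevels ch f (cur.flatMap ch)

lemma pvLevels_nil (ch : Int × Int → List (Int × Int)) (f : Nat) : pvLevels ch f [] = [] := by
  cases f <;> simp [pvLevels]

lemma pvStepA_eq (grid : List (List String)) (dir : String)
    (acc : List (Int × Int)) (c : Int × Int) :
    pvStepA grid dir acc c = acc ++ pvEmitA grid dir c := by
  simp only [pvStepA, pvEmitA]
  split_ifs <;> simp [List.append_assoc]

lemma pvLoopA_eq (grid : List (List String)) (dir : String) :
    ∀ (fuel : Nat) (cur pos : List (Int × Int)),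
      pvLoopA grid dir fuel cur pos =
        pos ++ pvLevels (pvEmitA grid dir) fuel cur := by
  intro fuel
  induction fuel with
  | zero => intro cur pos; simp [pvLoopA, pvLevels]
  | succ fuel ih =>
    intro cur pos
    show (if cur = [] then pos else _) = _
    by_cases hc : cur = []
    · simp [hc, pvLevels]
    · rw [if_neg hc]
      show pvLoopA grid dir fuel (cur.foldl (pvStepA grid dir) []) _ = _
      have hstep : (pvStepA grid dir) = fun acc c => acc ++ pvEmitA grid dir c :=
        funext fun acc => funext fun c => pvStepA_eq grid dir acc c
      rw [hstep, PySem.List.foldl_append_eq_flatMap, List.nil_append, ih]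
      show pos ++ cur.flatMap _ ++ _ = pos ++ pvLevels _ (fuel + 1) cur
      show _ = pos ++ if cur = [] then [] else _
      rw [if_neg hc, List.append_assoc]

-- a horizontal emission is a single optional step, so levels collapse to the scan
lemma pvWalk_eq_levels (grid : List (List String)) (step : Int)
    (ch : Int × Int → List (Int × Int))
    (h : ∀ p : Int × Int,
      ch p = if pvCellAt grid p.1 (p.2 + step) = "[" ∨ pvCellAt grid p.1 (p.2 + step) = "]"
             then [(p.1, p.2 + step)] else []) :
    ∀ (f : Nat) (r c : Int), pvLevels ch f [(r, c)] = pvWalk grid r step f c := by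
  intro f
  induction f with
  | zero => intro r c; rfl
  | succ f ih =>
    intro r c
    show (if _ then _ else List.flatMap ch [(r, c)] ++ pvLevels ch f (List.flatMap ch [(r, c)])) = _
    rw [if_neg (by simp), List.flatMap_singleton, h (r, c)]
    show _ = if pvCellAt grid r (c + step) = "[" ∨ pvCellAt grid r (c + step) = "]"
             then (r, c + step) :: pvWalk grid r step f (c + step) else []
    by_cases hb : pvCellAt grid r (c + step) = "[" ∨ pvCellAt grid r (c + step) = "]"
    · rw [if_pos hb, if_pos hb, ih]
      rfl
    · rw [if_neg hb, if_neg hb, List.nil_append, pvLevels_nil]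

-- B's generation recursion is A's level expansion with the same emission
lemma pvCascade_eq_levels (grid : List (List String)) (dr : Int) :
    ∀ (f : Nat) (cur : List (Int × Int)),
      pvCascade grid dr f cur =
        pvLevels (fun c => pvPushed grid c.1 c.2 dr) f cur := by
  intro f
  induction f with
  | zero => intro cur; rfl
  | succ f ih =>
    intro cur
    show (if _ then [] else _) = (if cur = [] then [] else _)
    by_cases hc : cur = []
    · subst hc; rfl
    · rw [if_neg hc]
      by_cases hn : cur.flatMap (fun c => pvPushed grid c.1 c.2 dr) = []
      · rw [if_pos hn, hn, List.nil_append, pvLevels_nil]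
      · rw [if_neg hn, ih]

-- A's emission at a horizontal dir is the optional single step the scan takes
lemma pvEmitA_left (grid : List (List String)) (p : Int × Int) :
    pvEmitA grid "<" p =
      if pvCellAt grid p.1 (p.2 + -1) = "[" ∨ pvCellAt grid p.1 (p.2 + -1) = "]"
      then [(p.1, p.2 + -1)] else [] := by
  simp [pvEmitA, pvNextPos, sub_eq_add_neg]

lemma pvEmitA_right (grid : List (List String)) (p : Int × Int) :
    pvEmitA grid ">" p =
      if pvCellAt grid p.1 (p.2 + 1) = "[" ∨ pvCellAt grid p.1 (p.2 + 1) = "]"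
      then [(p.1, p.2 + 1)] else [] := by
  simp [pvEmitA, pvNextPos]

-- A's emission at a vertical dir is B's _pushed
lemma pvEmitA_up (grid : List (List String)) (p : Int × Int) :
    pvEmitA grid "^" p = pvPushed grid p.1 p.2 (-1) := by
  simp only [pvEmitA, pvPushed, pvNextPos, String.reduceEq, if_false, if_true, or_self,
    sub_eq_add_neg]

lemma pvEmitA_down (grid : List (List String)) (p : Int × Int) :
    pvEmitA grid "v" p = pvPushed grid p.1 p.2 1 := by
  simp only [pvEmitA, pvPushed, pvNextPos, String.reduceEq, if_false, if_true, or_self]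

-- ===== VERDICT =====
theorem bfs_box_positions_spec : Claim_equal_bfs_box_positions := by
  intro grid row col dir _ hpre
  obtain ⟨hdir, -, -, -, -, -⟩ := hpre
  show bfs_box_positions grid row col dir = bfs_box_positions_alt grid row col dir
  unfold bfs_box_positions bfs_box_positions_alt
  rw [pvLoopA_eq grid dir _ _ [], List.nil_append]
  rcases hdir with h | h | h | h <;> subst h
  · rw [if_pos (Or.inl rfl), if_pos rfl,
      pvWalk_eq_levels grid (-1) _ (pvEmitA_left grid) _ row col]
  · rw [if_neg (by simp), if_pos (Or.inl rfl), if_pos rfl, pvCascade_eq_levels]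
    exact congrArg (fun ch => List.map (fun p : Int × Int => [p.1, p.2]) (pvLevels ch (pvFuel grid row col) [(row, col)])) (funext (pvEmitA_up grid))
  · rw [if_pos (Or.inr rfl), if_neg (by simp),
      pvWalk_eq_levels grid 1 _ (pvEmitA_right grid) _ row col]
  · rw [if_neg (by simp), if_pos (Or.inr rfl), if_neg (by simp), pvCascade_eq_levels]
    exact congrArg (fun ch => List.map (fun p : Int × Int => [p.1, p.2]) (pvLevels ch (pvFuel grid row col) [(row, col)])) (funext (pvEmitA_down grid))
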